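-- pv_equiv track=rewrite | github.com/KieronJones/Uni-of-York-Computer-Science | Year 1/SOF1/Week4/Practical3.py | right_angled_triangle
-- ===== SOURCE A (Python) =====
-- def right_angled_triangle(rows):
--     add_1 = True
--     output = ""
--     for row in range(rows):
--         if row%2 == 0:
--             add_1 = True
--         else:
--             add_1 = False
--
--         for index in range(row+1):
--             if add_1:
--                 output += "1"
--             else:
--                 output += "0"
--             add_1 = not add_1
--
--         output += '\n'
--
--     return output
-- ===== SOURCE B (Python) =====
-- def right_angled_triangle(rows):
--     lines = []
--     for row in range(rows):
--         pattern = "10" if row % 2 == 0 else "01"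
--         lines.append((pattern * (row // 2 + 1))[:row + 1] + "\n")
--     return "".join(lines)
-- ===== Notes on version B (the rewrite author's own statement) =====
-- stated objective: idiomatic
-- what changed: Replaces the char-by-char inner loop with its toggling add_1 flag by per-row string repetition and slicing ((pattern*(row//2+1))[:row+1]) joined at the end, using the closed form that a cell is '1' iff row+index is even.
import Mathlib
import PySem

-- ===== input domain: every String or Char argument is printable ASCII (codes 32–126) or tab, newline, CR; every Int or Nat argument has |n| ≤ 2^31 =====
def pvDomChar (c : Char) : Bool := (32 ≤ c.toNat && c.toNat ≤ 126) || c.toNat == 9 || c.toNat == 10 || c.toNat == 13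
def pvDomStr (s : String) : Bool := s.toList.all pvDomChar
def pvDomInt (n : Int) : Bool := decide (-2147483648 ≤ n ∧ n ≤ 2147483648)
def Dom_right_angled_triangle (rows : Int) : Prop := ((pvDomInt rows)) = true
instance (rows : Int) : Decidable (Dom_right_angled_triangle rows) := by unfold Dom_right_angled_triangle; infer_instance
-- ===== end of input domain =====

-- B replaces A's char-by-char inner loop (toggling add_1 flag) by per-row string
-- repetition and slicing, joined at the end (objective: idiomatic).

-- ===== PORT A =====
def right_angled_triangle (rows : Int) : String :=
  ((PySem.List.pyRange 0 rows 1).foldl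
    (fun (st : Bool × String) row =>
      let add1 : Bool := if PySem.Int.mod row 2 == 0 then true else false
      let inner := (PySem.List.pyRange 0 (row + 1) 1).foldl
        (fun (st2 : Bool × String) _ =>
          (!st2.1, st2.2 ++ (if st2.1 then "1" else "0")))
        (add1, st.2)
      (inner.1, inner.2 ++ "\n"))
    (true, "")).2

-- ===== PORT B =====
def right_angled_triangle_alt (rows : Int) : String :=
  PySem.Str.join "" ((PySem.List.pyRange 0 rows 1).map (fun row =>
    let pattern : String := if PySem.Int.mod row 2 == 0 then "10" else "01"
    String.ofList (PySem.List.slice (PySem.List.pyRepeat pattern.toList (PySem.Int.floordiv row 2 + 1)) none (some (row + 1))) ++ "\n"))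

-- ===== PRECONDITION & SPEC =====
def Spec_right_angled_triangle (rows : Int) (out : String) : Prop := out = right_angled_triangle_alt rows
instance (rows : Int) (out : String) : Decidable (Spec_right_angled_triangle rows out) := by unfold Spec_right_angled_triangle; infer_instance

-- ===== CLAIM (what is proved, stated in full; the proofs are below) =====
def Claim_equal_right_angled_triangle : Prop := ∀ (rows : Int), Dom_right_angled_triangle rows → Spec_right_angled_triangle rows (right_angled_triangle rows)

-- ===== LEMMAS AND PROOFS =====

-- the alternating row prefix: pat2 a b k = first k chars of the infinite alternation a,b,a,b,…
def pat2 : Char → Char → Nat → List Char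
  | _, _, 0 => []
  | a, b, k+1 => a :: pat2 b a k

-- A's inner loop appends exactly the alternation determined by the starting flag
theorem innerA_snd (l : List Int) : ∀ (b : Bool) (s : String),
    ((l.foldl (fun (st2 : Bool × String) _ =>
        (!st2.1, st2.2 ++ (if st2.1 then "1" else "0"))) (b, s)).2).toList
      = s.toList ++ pat2 (if b then '1' else '0') (if b then '0' else '1') l.length := by
  induction l with
  | nil => intro b s; simp [pat2]
  | cons x t ih =>
    intro b s
    simp only [List.foldl_cons, List.length_cons, pat2]
    rw [ih]
    cases b <;> simp

-- a prefix of the repeated 2-char block is the alternation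
theorem take_flat (a b : Char) : ∀ (m k : Nat), k ≤ 2 * m →
    (List.replicate m [a, b]).flatten.take k = pat2 a b k := by
  intro m
  induction m with
  | zero => intro k hk; interval_cases k; simp [pat2]
  | succ m ih =>
    intro k hk
    match k with
    | 0 => simp [pat2]
    | 1 => simp [List.replicate_succ, pat2]
    | (k+2) =>
      have : (List.replicate (m+1) [a,b]).flatten = a :: b :: (List.replicate m [a,b]).flatten := by
        simp [List.replicate_succ]
      rw [this]
      simp only [List.take_succ_cons, pat2]
      rw [ih k (by omega)]

-- B's row (repetition then slice) is the same alternation, for a nonnegative row index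
theorem rowB_chars (r : Nat) :
    PySem.List.slice
      (PySem.List.pyRepeat (if PySem.Int.mod (r : Int) 2 == 0 then "10" else "01").toList
        (PySem.Int.floordiv (r : Int) 2 + 1)) none (some ((r : Int) + 1))
    = pat2 (if PySem.Int.mod (r : Int) 2 == 0 then '1' else '0')
           (if PySem.Int.mod (r : Int) 2 == 0 then '0' else '1') (r + 1) := by
  have hm : PySem.Int.mod (r : Int) 2 = ((r % 2 : Nat) : Int) := PySem.Int.mod_natCast r 2
  have hd : PySem.Int.floordiv (r : Int) 2 = ((r / 2 : Nat) : Int) := PySem.Int.floordiv_natCast r 2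
  have hcast : (r : Int) + 1 = ((r + 1 : Nat) : Int) := by push_cast; ring
  rw [hcast, PySem.List.slice_to_natCast]
  have htn : (PySem.Int.floordiv (r : Int) 2 + 1).toNat = r / 2 + 1 := by
    rw [hd]; omega
  unfold PySem.List.pyRepeat
  rw [htn, hm]
  have hle : r + 1 ≤ 2 * (r / 2 + 1) := by omega
  by_cases h : r % 2 = 0
  · have : (((r % 2 : Nat) : Int) == 0) = true := by simp [h]
    rw [this]
    simpa using take_flat '1' '0' (r / 2 + 1) (r + 1) hle
  · have : (((r % 2 : Nat) : Int) == 0) = false := by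
      simp only [beq_eq_false_iff_ne, ne_eq]
      exact_mod_cast h
    rw [this]
    simpa using take_flat '0' '1' (r / 2 + 1) (r + 1) hle

-- the common row body, as a list of chars
def rowChars (r : Nat) : List Char :=
  pat2 (if PySem.Int.mod (r : Int) 2 == 0 then '1' else '0')
       (if PySem.Int.mod (r : Int) 2 == 0 then '0' else '1') (r + 1) ++ ['\n']

-- A's outer fold: the string part accumulates rowChars, whatever the incoming flag is
theorem outerA_snd (n : Nat) : ∀ (b : Bool) (s : String),
    (((List.range n).map (fun k : Nat => (k : Int))).foldl
      (fun (st : Bool × String) row =>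
        let add1 : Bool := if PySem.Int.mod row 2 == 0 then true else false
        let inner := (PySem.List.pyRange 0 (row + 1) 1).foldl
          (fun (st2 : Bool × String) _ =>
            (!st2.1, st2.2 ++ (if st2.1 then "1" else "0")))
          (add1, st.2)
        (inner.1, inner.2 ++ "\n")) (b, s)).2.toList
    = s.toList ++ (List.range n).flatMap rowChars := by
  induction n with
  | zero => intro b s; simp
  | succ n ih =>
    intro b s
    rw [List.range_succ, List.map_append, List.foldl_append]
    simp only [List.map_cons, List.map_nil, List.foldl_cons, List.foldl_nil]
    have hrange : PySem.List.pyRange 0 ((n : Int) + 1) 1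
        = (List.range (n + 1)).map (fun k : Nat => (k : Int)) := by
      have h1 : (n : Int) + 1 = ((n + 1 : Nat) : Int) := by push_cast; ring
      rw [h1]; exact PySem.List.pyRange_zero_nat (n + 1)
    simp only [hrange, String.toList_append, innerA_snd, List.length_map,
      List.length_range, ih]
    simp [rowChars, List.flatMap_append]

-- joining with the empty separator is flattening
theorem join_empty (parts : List String) :
    (PySem.Str.join "" parts).toList = (parts.map String.toList).flatten := by
  rw [PySem.Str.toList_join]
  show PySem.Chars.join ("".toList) _ = _
  unfold PySem.Chars.join
  induction (parts.map String.toList) with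
  | nil => simp [List.intercalate]
  | cons x t ih =>
    cases t with
    | nil => simp [List.intercalate]
    | cons y u =>
      simp only [List.intercalate, List.flatten] at *
      simpa [List.intersperse] using ih

-- B's whole output, as a list of chars
theorem altB_chars (n : Nat) :
    (right_angled_triangle_alt (n : Int)).toList = (List.range n).flatMap rowChars := by
  unfold right_angled_triangle_alt
  rw [PySem.List.pyRange_zero_nat n, join_empty, List.map_map, List.map_map]
  rw [List.flatMap_def]
  refine congrArg List.flatten (List.map_congr_left ?_)
  intro r _
  simp only [Function.comp_apply, String.toList_append, String.toList_ofList, rowChars]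
  rw [← rowB_chars r]
  rfl

theorem both_eq (n : Nat) :
    right_angled_triangle (n : Int) = right_angled_triangle_alt (n : Int) := by
  rw [← String.toList_inj]
  unfold right_angled_triangle
  rw [altB_chars n]
  have hrange : PySem.List.pyRange 0 ((n : Int)) 1
      = (List.range n).map (fun k : Nat => (k : Int)) := PySem.List.pyRange_zero_nat n
  rw [hrange, outerA_snd n true ""]
  rfl

theorem neg_case (rows : Int) (h : rows ≤ 0) :
    right_angled_triangle rows = right_angled_triangle_alt rows := by
  unfold right_angled_triangle right_angled_triangle_alt
  rw [PySem.List.pyRange_one_eq_nil h]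
  rfl

-- ===== VERDICT (by name: the statement is the Claim_ definition above) =====
theorem right_angled_triangle_spec : Claim_equal_right_angled_triangle := by
  intro rows _
  unfold Spec_right_angled_triangle
  rcases (by omega : rows ≤ 0 ∨ 0 < rows) with h | h
  · exact neg_case rows h
  · obtain ⟨n, rfl⟩ : ∃ n : Nat, rows = (n : Int) :=
      ⟨rows.toNat, by omega⟩
    exact both_eq n
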